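-- pv_equiv track=rewrite | github.com/yc9559/cpufreq-interactive-opt | project/20180603.2/recent_version/1031-cpufreq_interactive_stimulator_OO.py | target_loads_generator
-- ===== SOURCE A (Python) =====
-- def target_loads_generator(availble_loads):
--     target_loads = []
--     for a4 in availble_loads:
--         for a5 in availble_loads:
--             for a6 in availble_loads:
--                 for a7 in availble_loads:
--                     for a8 in availble_loads:
--                         target_loads.append([50,60,50,a4,a5,a6,a7,a8,70,90])
--     return target_loads
-- ===== SOURCE B (Python) =====
-- def target_loads_generator(availble_loads):
--     combos = [[]]
--     for _ in range(5):
--         combos = [c + [x] for c in combos for x in availble_loads]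
--     return [[50, 60, 50] + c + [70, 90] for c in combos]
-- ===== Notes on version B (the rewrite author's own statement) =====
-- stated objective: simpler
-- what changed: Replaces the five statically nested loops with an incremental 5-fold Cartesian-product accumulator grown one position per pass, then a single comprehension attaching the fixed prefix and suffix.
import Mathlib
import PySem

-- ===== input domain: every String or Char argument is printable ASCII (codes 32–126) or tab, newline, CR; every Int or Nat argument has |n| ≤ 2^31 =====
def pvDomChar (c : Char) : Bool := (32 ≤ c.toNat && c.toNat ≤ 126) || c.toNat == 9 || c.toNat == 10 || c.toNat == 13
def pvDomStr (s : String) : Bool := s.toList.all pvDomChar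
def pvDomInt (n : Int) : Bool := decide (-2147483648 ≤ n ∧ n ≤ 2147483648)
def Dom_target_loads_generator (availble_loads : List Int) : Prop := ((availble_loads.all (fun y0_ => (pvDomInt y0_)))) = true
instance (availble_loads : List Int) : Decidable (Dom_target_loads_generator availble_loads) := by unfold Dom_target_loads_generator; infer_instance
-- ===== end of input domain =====

-- B replaces A's five statically nested loops with an incremental 5-fold Cartesian-product
-- accumulator grown one position per pass (objective: simpler).

-- ===== PORT A =====
-- five nested 'for' loops, each 'append' adds one row to the accumulator
def target_loads_generator (availble_loads : List Int) : List (List Int) :=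
  availble_loads.foldl (fun acc a4 =>
    availble_loads.foldl (fun acc a5 =>
      availble_loads.foldl (fun acc a6 =>
        availble_loads.foldl (fun acc a7 =>
          availble_loads.foldl (fun acc a8 =>
            acc ++ [[50, 60, 50, a4, a5, a6, a7, a8, 70, 90]]) acc) acc) acc) acc) []

-- ===== PORT B =====
-- combos = [[]]; five passes of 'combos = [c + [x] for c in combos for x in availble_loads]';
-- then attach the fixed prefix and suffix
def target_loads_generator_alt (availble_loads : List Int) : List (List Int) :=
  let combos := (List.range 5).foldl
    (fun cs _ => cs.flatMap (fun c => availble_loads.map (fun x => c ++ [x]))) [[]]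
  combos.map (fun c => [50, 60, 50] ++ c ++ [70, 90])

-- ===== PRECONDITION & SPEC =====
def Spec_target_loads_generator (availble_loads : List Int) (out : List (List Int)) : Prop := out = target_loads_generator_alt availble_loads
instance (availble_loads : List Int) (out : List (List Int)) : Decidable (Spec_target_loads_generator availble_loads out) := by unfold Spec_target_loads_generator; infer_instance

-- ===== CLAIM (what is proved, stated in full; the proofs are below) =====
def Claim_equal_target_loads_generator : Prop := ∀ (availble_loads : List Int), Dom_target_loads_generator availble_loads → Spec_target_loads_generator availble_loads (target_loads_generator availble_loads)

-- ===== LEMMAS AND PROOFS =====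

-- ===== VERDICT (by name: the statement is the Claim_ definition above) =====
theorem target_loads_generator_spec : Claim_equal_target_loads_generator := by
  intro xs _
  unfold Spec_target_loads_generator target_loads_generator target_loads_generator_alt
  simp only [PySem.List.foldl_append_eq_flatMap, List.nil_append]
  simp [List.range_succ, List.flatMap_assoc, List.map_flatMap, List.flatMap_map,
    Function.comp_def, List.cons_append, List.nil_append]
  simp only [Eq.symm List.map_eq_flatMap]
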